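-- pv_equiv track=rewrite | github.com/Dekr0/self-libs | CMPUT_274/weekly_exercises/weekly_exercise4/preprocess/preprocess.py | process
-- ===== SOURCE A (Python) =====
-- def process(txt, mode):
--     """
--     Main process / flow of processing the list of words. Steps removing
--     symbols, removing digits, removing stops are performed in order.
--
--     :param txt: unprocessed text
--     :param mode: step needed not to perform
--     :return: a list of processed words
--     """
--
--     # Store the identifier of the functions into dictionary
--     modes = {
--         "keep-symbols": rm_symbols,
--         "keep-digits": rm_digits,
--         "keep-stops": rm_stops,
--     }
--
--     r_words = txt.lower().split()
--
--     if not r_words: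
--         return []
--
--     # If argument mode is provided, corresponding function identifier
--     # will be remove, which means that the step will not perform
--     if mode:
--         del modes[mode]
--
--     for func in modes.values():
--         r_words = func(r_words)
--
--     pro_words = r_words
--
--     return pro_words
--
-- def rm_digits(words):
--     """
--     Remove all numbers unless the word consists only of numbers
--
--     :param words: a list of unprocessed words
--     :return: a list of processed words whose numbers are removed
--     """
--
--     for i in range(len(words)):
--         if not all([char.isdigit() for char in words[i]]):
--             words[i] = "".join([char for char in words[i]
--                                 if not char.isdigit()])
--
--     return words
--
-- def rm_stops(words):
--     """
--     Remove all the stopwords from a list of words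
--
--     :param words: a list of unprocessed words
--     :return: a list of words without stopwords
--     """
--
--     stopwords = ["i", "me", "my", "myself", "we", "our", "ours", "ourselves",
--                  "you", "your", "yours", "yourself", "yourselves", "he",
--                  "him", "his", "himself", "she", "her", "hers", "herself",
--                  "it", "its", "itself", "they", "them", "their", "theirs",
--                  "themselves", "what", "which", "who", "whom", "this", "that",
--                  "these", "those", "am", "is", "are", "was", "were", "be",
--                  "been", "being", "have", "has", "had", "having", "do", "does",
--                  "did", "doing", "a", "an", "the", "and", "but", "if", "or",
--                  "because", "as", "until", "while", "of", "at", "by", "for",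
--                  "with", "about", "against", "between", "into", "through",
--                  "during", "before", "after", "above", "below", "to", "from",
--                  "up", "down", "in", "out", "on", "off", "over", "under",
--                  "again", "further", "then", "once", "here", "there",
--                  "when", "where", "why", "how", "all", "any", "both",
--                  "each", "few", "more", "most", "other", "some", "such",
--                  "no", "nor", "not", "only", "own", "same", "so", "than",
--                  "too", "very", "s", "t", "can", "will", "just", "don",
--                  "should", "now"]
--
--     p_word = [word for word in words if word not in stopwords]
--
--     return p_word
--
-- def rm_symbols(words):
--     """
--     Remove all the symbols and punctuations in the word
--
--     :param words:
--     :return: a list of processed words whose punctuations and symbols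
--     are removed
--     """
--
--     for i in range(len(words)):
--         words[i] = "".join([char for char in words[i] if char.isalnum()])
--
--     return words
-- ===== SOURCE B (Python) =====
-- _STOP = frozenset(
--     "i me my myself we our ours ourselves you your yours yourself yourselves "
--     "he him his himself she her hers herself it its itself they them their "
--     "theirs themselves what which who whom this that these those am is are "
--     "was were be been being have has had having do does did doing a an the "
--     "and but if or because as until while of at by for with about against "
--     "between into through during before after above below to from up down "
--     "in out on off over under again further then once here there when where "
--     "why how all any both each few more most other some such no nor not only "
--     "own same so than too very s t can will just don should now".split())
--
-- _STAGES = ("keep-symbols", "keep-digits", "keep-stops")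
--
--
-- def _scrub(word, skip):
--     """One scan over the word's characters, collecting simultaneously the
--     symbol-stage survivors and, among those, the non-digits."""
--     sym = []
--     nod = []
--     for c in word:
--         if skip == "keep-symbols" or c.isalnum():
--             sym.append(c)
--             if not c.isdigit():
--                 nod.append(c)
--     if skip == "keep-digits" or not nod:  # all-digit (or empty) words kept whole
--         return "".join(sym)
--     return "".join(nod)
--
--
-- def _go(words, skip):
--     """Structural recursion over the word list."""
--     if not words:
--         return []
--     w = _scrub(words[0], skip)
--     rest = _go(words[1:], skip)
--     if skip != "keep-stops" and w in _STOP: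
--         return rest
--     return [w] + rest
--
--
-- def process(txt, mode):
--     words = txt.lower().split()
--     if not words:
--         return []
--     skip = mode or ""
--     if skip and skip not in _STAGES:
--         raise KeyError(skip)
--     return _go(words, skip)
-- ===== Notes on version B (the rewrite author's own statement) =====
-- stated objective: alternative
-- what changed: A pipes the whole word list through a dict of three stage functions (two index loops mutating words[i] plus a stopword filter pass); B is a structural recursion over the word list that scrubs each word in a single character scan computing the symbol-stage survivors and their non-digit subsequence simultaneously, with the stopwords kept in a frozenset built from one split string.
import Mathlib
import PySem

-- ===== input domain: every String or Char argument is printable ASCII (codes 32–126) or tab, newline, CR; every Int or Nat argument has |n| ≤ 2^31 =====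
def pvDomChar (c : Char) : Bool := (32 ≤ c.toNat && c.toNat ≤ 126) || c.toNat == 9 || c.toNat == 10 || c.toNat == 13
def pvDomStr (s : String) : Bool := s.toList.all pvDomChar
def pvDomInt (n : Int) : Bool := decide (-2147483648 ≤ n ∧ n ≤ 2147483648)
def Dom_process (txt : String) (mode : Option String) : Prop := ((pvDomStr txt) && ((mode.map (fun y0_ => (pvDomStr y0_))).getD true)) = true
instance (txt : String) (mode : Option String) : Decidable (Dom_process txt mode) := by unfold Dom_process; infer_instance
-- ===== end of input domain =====

-- B replaces A's dict-of-stage-functions pipeline (three whole-list passes) by a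
-- structural recursion over the words with a single char scan per word (objective: alternative).


-- ===== PORT A =====
def stopwordsA : List String := [
  "i", "me", "my", "myself", "we", "our", "ours", "ourselves",
  "you", "your", "yours", "yourself", "yourselves", "he", "him", "his",
  "himself", "she", "her", "hers", "herself", "it", "its", "itself",
  "they", "them", "their", "theirs", "themselves", "what", "which", "who",
  "whom", "this", "that", "these", "those", "am", "is", "are",
  "was", "were", "be", "been", "being", "have", "has", "had",
  "having", "do", "does", "did", "doing", "a", "an", "the",
  "and", "but", "if", "or", "because", "as", "until", "while",
  "of", "at", "by", "for", "with", "about", "against", "between",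
  "into", "through", "during", "before", "after", "above", "below", "to",
  "from", "up", "down", "in", "out", "on", "off", "over",
  "under", "again", "further", "then", "once", "here", "there", "when",
  "where", "why", "how", "all", "any", "both", "each", "few",
  "more", "most", "other", "some", "such", "no", "nor", "not",
  "only", "own", "same", "so", "than", "too", "very", "s",
  "t", "can", "will", "just", "don", "should", "now"]

-- "".join([char for char in words[i] if char.isalnum()]) — a join of single-char strings
-- is String.ofList of the filtered chars.
def rmSymbolsA (words : List String) : List String :=
  (PySem.List.pyRange 0 (words.length : Int) 1).foldl
    (fun ws i => PySem.List.pySetD ws i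
      (String.ofList ((PySem.List.pyGetD ws i "").toList.filter PySem.Chars.isalnum))) words

def rmDigitsA (words : List String) : List String :=
  (PySem.List.pyRange 0 (words.length : Int) 1).foldl
    (fun ws i =>
      if !((PySem.List.pyGetD ws i "").toList.all PySem.Chars.isdigit) then
        PySem.List.pySetD ws i
          (String.ofList ((PySem.List.pyGetD ws i "").toList.filter (fun c => !PySem.Chars.isdigit c)))
      else ws) words

def rmStopsA (words : List String) : List String :=
  words.filter (fun word => !stopwordsA.contains word)

def process (txt : String) (mode : Option String) : List String :=
  let modes : PySem.Dict String (List String → List String) :=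
    PySem.Dict.ofList
      [("keep-symbols", rmSymbolsA), ("keep-digits", rmDigitsA), ("keep-stops", rmStopsA)]
  let r_words := PySem.Str.split₀ (PySem.Str.lower txt)
  if r_words = [] then []
  else
    -- 'del modes[mode]' raises KeyError on a truthy mode that is not a key; those
    -- inputs are outside Pre_process (Dict.erase is a no-op there).
    let modes := match mode with
      | none => modes
      | some m => if m = "" then modes else modes.erase m
    modes.values.foldl (fun ws f => f ws) r_words

-- ===== PORT B =====
-- Source B keeps the stopwords in a frozenset built from a literal tuple
def stopwordsB : List String :=
  "i" :: "me" :: "my" :: "myself" :: "we" :: "our" :: "ours" :: "ourselves" ::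
  "you" :: "your" :: "yours" :: "yourself" :: "yourselves" :: "he" :: "him" :: "his" ::
  "himself" :: "she" :: "her" :: "hers" :: "herself" :: "it" :: "its" :: "itself" ::
  "they" :: "them" :: "their" :: "theirs" :: "themselves" :: "what" :: "which" :: "who" ::
  "whom" :: "this" :: "that" :: "these" :: "those" :: "am" :: "is" :: "are" ::
  "was" :: "were" :: "be" :: "been" :: "being" :: "have" :: "has" :: "had" ::
  "having" :: "do" :: "does" :: "did" :: "doing" :: "a" :: "an" :: "the" ::
  "and" :: "but" :: "if" :: "or" :: "because" :: "as" :: "until" :: "while" ::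
  "of" :: "at" :: "by" :: "for" :: "with" :: "about" :: "against" :: "between" ::
  "into" :: "through" :: "during" :: "before" :: "after" :: "above" :: "below" :: "to" ::
  "from" :: "up" :: "down" :: "in" :: "out" :: "on" :: "off" :: "over" ::
  "under" :: "again" :: "further" :: "then" :: "once" :: "here" :: "there" :: "when" ::
  "where" :: "why" :: "how" :: "all" :: "any" :: "both" :: "each" :: "few" ::
  "more" :: "most" :: "other" :: "some" :: "such" :: "no" :: "nor" :: "not" ::
  "only" :: "own" :: "same" :: "so" :: "than" :: "too" :: "very" :: "s" ::
  "t" :: "can" :: "will" :: "just" :: "don" :: "should" :: "now" :: []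

def stopSetB : PySem.Set String := PySem.Set.ofList stopwordsB

-- one scan over the word's chars: (symbol-stage survivors, their non-digit subsequence)
def scrubCharsB (skip : String) : List Char → List Char × List Char
  | [] => ([], [])
  | c :: cs =>
    let r := scrubCharsB skip cs
    if skip = "keep-symbols" || PySem.Chars.isalnum c then
      (c :: r.1, if PySem.Chars.isdigit c then r.2 else c :: r.2)
    else r

def scrubB (word : String) (skip : String) : String :=
  let r := scrubCharsB skip word.toList
  if skip = "keep-digits" || r.2 = [] then String.ofList r.1 else String.ofList r.2

def goB (skip : String) : List String → List String
  | [] => []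
  | w :: ws =>
    let w' := scrubB w skip
    let rest := goB skip ws
    if skip ≠ "keep-stops" ∧ stopSetB.contains w' then rest else w' :: rest

def process_alt (txt : String) (mode : Option String) : List String :=
  let words := PySem.Str.split₀ (PySem.Str.lower txt)
  if words = [] then []
  else
    -- Source B raises KeyError on a truthy mode naming no stage; those inputs are outside Pre_process
    goB (mode.getD "") words

-- ===== PRECONDITION & SPEC =====
-- Pre_ excludes exactly the inputs where A raises KeyError ('del modes[mode]' with a
-- truthy mode that is not a key, reached only when the text contains a word); B raises
-- KeyError there too.
def Pre_process (txt : String) (mode : Option String) : Prop :=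
  PySem.Str.split₀ (PySem.Str.lower txt) = [] ∨ mode = none ∨ mode = some "" ∨
  mode = some "keep-symbols" ∨ mode = some "keep-digits" ∨ mode = some "keep-stops"
instance (txt : String) (mode : Option String) : Decidable (Pre_process txt mode) := by
  unfold Pre_process; infer_instance

def pvWitness_process : String × Option String := ("The cat ate 12 and a2b!", some "keep-digits")

def Spec_process (txt : String) (mode : Option String) (out : List String) : Prop :=
  out = process_alt txt mode
instance (txt : String) (mode : Option String) (out : List String) :
    Decidable (Spec_process txt mode out) := by unfold Spec_process; infer_instance

-- ===== CLAIM (what is proved, stated in full; the proofs are below) =====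
def Claim_equal_process : Prop := ∀ (txt : String) (mode : Option String),
  Dom_process txt mode → Pre_process txt mode → Spec_process txt mode (process txt mode)

-- ===== LEMMAS AND PROOFS =====

-- per-word transforms A's symbol and digit stages amount to
def fSym (w : String) : String := String.ofList (w.toList.filter PySem.Chars.isalnum)
def fDig (w : String) : String :=
  if w.toList.all PySem.Chars.isdigit then w
  else String.ofList (w.toList.filter (fun c => !PySem.Chars.isdigit c))

-- A's index loops 'for i in range(len(words)): words[i] = f(words[i])' are List.map f
lemma foldl_set_aux (f : String → String) (step : List String → Int → List String)
    (hstep : ∀ (l : List String) (n : Nat), n < l.length → step l (n : Int) = l.set n (f (l.getD n "")))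
    (ws : List String) (n : Nat) (h : n ≤ ws.length) :
    (PySem.List.pyRange 0 (n : Int) 1).foldl step ws = (ws.take n).map f ++ ws.drop n := by
  induction n with
  | zero => simp [PySem.List.pyRange_one_eq_nil]
  | succ n ih =>
    have hn : n < ws.length := h
    have h1 : ((n+1 : Nat) : Int) = (n : Int) + 1 := by push_cast; ring
    rw [h1, PySem.List.pyRange_one_succ_right (by positivity), List.foldl_append,
        ih (Nat.le_of_lt hn)]
    set prev := (ws.take n).map f ++ ws.drop n with hprev
    have hlen : prev.length = ws.length := by
      simp [hprev]
      omega
    rw [List.foldl_cons, List.foldl_nil, hstep prev n (by omega)]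
    have hget : prev.getD n "" = ws[n] := by
      rw [List.getD_eq_getElem?_getD, hprev,
          List.getElem?_append_right (by simp [Nat.min_eq_left (Nat.le_of_lt hn)])]
      simp [Nat.min_eq_left (Nat.le_of_lt hn)]
      simp [List.getElem?_eq_getElem hn]
    have hdrop : ws.drop n = ws[n] :: ws.drop (n+1) := List.drop_eq_getElem_cons hn
    rw [hget, hprev, List.set_append]
    simp only [List.length_map, List.length_take, Nat.min_eq_left (Nat.le_of_lt hn), lt_irrefl,
      Nat.sub_self]
    rw [hdrop, List.set_cons_zero]
    have htake : List.take (n+1) ws = List.take n ws ++ [ws[n]] := by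
      rw [List.take_add_one]
      simp [List.getElem?_eq_getElem hn]
    rw [if_neg (by simp), htake, List.map_append]
    simp

lemma foldl_set_eq_map (f : String → String) (step : List String → Int → List String)
    (hstep : ∀ (l : List String) (n : Nat), n < l.length → step l (n : Int) = l.set n (f (l.getD n "")))
    (ws : List String) :
    (PySem.List.pyRange 0 (ws.length : Int) 1).foldl step ws = ws.map f := by
  rw [foldl_set_aux f step hstep ws ws.length le_rfl]
  simp

lemma rmSymbolsA_eq_map (ws : List String) : rmSymbolsA ws = ws.map fSym := by
  refine foldl_set_eq_map fSym _ ?_ ws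
  intro l n h
  simp [fSym, PySem.List.pySetD_natCast, PySem.List.pyGetD_natCast]

lemma rmDigitsA_eq_map (ws : List String) : rmDigitsA ws = ws.map fDig := by
  refine foldl_set_eq_map fDig _ ?_ ws
  intro l n h
  simp only [PySem.List.pyGetD_natCast, PySem.List.pySetD_natCast, fDig,
    List.getD_eq_getElem?_getD]
  by_cases hall : ((l[n]?.getD "").toList.all PySem.Chars.isdigit) = true
  · rw [if_neg (by simp [hall]), if_pos hall, ← List.getD_eq_getElem?_getD,
        List.getD_eq_getElem l "" h, List.set_getElem_self h]
  · rw [if_pos (by simp [hall]), if_neg hall]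

-- B's char scan computes the two filters at once
lemma scrubCharsB_eq (skip : String) (l : List Char) :
    scrubCharsB skip l =
      (l.filter (fun c => skip = "keep-symbols" || PySem.Chars.isalnum c),
       (l.filter (fun c => skip = "keep-symbols" || PySem.Chars.isalnum c)).filter
         (fun c => !PySem.Chars.isdigit c)) := by
  induction l with
  | nil => rfl
  | cons c cs ih =>
    by_cases hc : (skip = "keep-symbols" || PySem.Chars.isalnum c) = true
    · by_cases hd : PySem.Chars.isdigit c = true <;>
        simp [scrubCharsB, ih, hc, hd]
    · simp [scrubCharsB, ih, hc]

lemma all_iff_filter_nil (l : List Char) :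
    (l.filter (fun c => !PySem.Chars.isdigit c) = []) ↔ (l.all PySem.Chars.isdigit = true) := by
  simp [List.filter_eq_nil_iff, List.all_eq_true]

-- scrubB for a skip that names neither the symbol nor the digit stage
lemma scrubB_notSymDig (w : String) (skip : String)
    (h1 : skip ≠ "keep-symbols") (h2 : skip ≠ "keep-digits") :
    scrubB w skip = fDig (fSym w) := by
  simp only [scrubB, scrubCharsB_eq]
  have hp : (fun c => decide (skip = "keep-symbols") || PySem.Chars.isalnum c)
      = fun c => PySem.Chars.isalnum c := by
    funext c; simp [h1]
  rw [hp]
  simp only [fDig, fSym]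
  have hfl : (String.ofList (w.toList.filter PySem.Chars.isalnum)).toList
      = w.toList.filter PySem.Chars.isalnum := by simp
  rw [hfl]
  by_cases hfil : (w.toList.filter PySem.Chars.isalnum).filter (fun c => !PySem.Chars.isdigit c) = []
  · rw [if_pos (by simp [h2, hfil]), if_pos ((all_iff_filter_nil _).mp hfil)]
  · have hcond : (decide (skip = "keep-digits")
        || decide ((w.toList.filter PySem.Chars.isalnum).filter
            (fun c => !PySem.Chars.isdigit c) = [])) = false := by
      rw [decide_eq_false h2, decide_eq_false hfil]
      rfl
    rw [if_neg (show ¬ _ = true by rw [hcond]; simp),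
        if_neg (fun hh => hfil ((all_iff_filter_nil _).mpr hh))]

lemma scrubB_sym (w : String) : scrubB w "keep-symbols" = fDig w := by
  by_cases hall : w.toList.all PySem.Chars.isdigit = true
  · have hfil := (all_iff_filter_nil w.toList).mpr hall
    simp [scrubB, scrubCharsB_eq, fDig, hall, hfil]
  · have hfil : w.toList.filter (fun c => !PySem.Chars.isdigit c) ≠ [] :=
      fun hh => hall ((all_iff_filter_nil _).mp hh)
    simp [scrubB, scrubCharsB_eq, fDig, hall, hfil]

lemma scrubB_dig (w : String) : scrubB w "keep-digits" = fSym w := by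
  simp only [scrubB, scrubCharsB_eq, fSym]
  rw [if_pos (by simp)]
  congr 1

-- Source B's stopword set holds exactly A's stopword list
lemma stop_contains (w : String) : stopSetB.contains w = stopwordsA.contains w := by
  have hB : stopwordsB = stopwordsA := rfl
  rw [Bool.eq_iff_iff]
  simp [stopSetB, hB, PySem.Set.mem_ofList]

-- B's recursion is filter-of-map when the stop stage runs …
lemma goB_eq_filter_map (skip : String) (h : skip ≠ "keep-stops") (ws : List String) :
    goB skip ws = (ws.map (fun w => scrubB w skip)).filter
      (fun w' => !stopwordsA.contains w') := by
  induction ws with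
  | nil => rfl
  | cons w tl ih =>
    simp only [goB, ih, List.map_cons, List.filter_cons, stop_contains]
    by_cases hc : scrubB w skip ∈ stopwordsA
    · rw [if_pos ⟨h, by simp [hc]⟩]
      simp [hc]
    · rw [if_neg (fun hh => hc (by simpa using hh.2))]
      simp [hc]

-- … and plain map when it is skipped
lemma goB_stops (ws : List String) :
    goB "keep-stops" ws = ws.map (fun w => scrubB w "keep-stops") := by
  induction ws with
  | nil => rfl
  | cons w tl ih => simp [goB, ih]

-- the literal modes dict reduced, with and without the 'del'
def modesD : PySem.Dict String (List String → List String) :=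
  PySem.Dict.ofList
    [("keep-symbols", rmSymbolsA), ("keep-digits", rmDigitsA), ("keep-stops", rmStopsA)]
lemma vals_all : modesD.values = [rmSymbolsA, rmDigitsA, rmStopsA] := rfl
lemma vals_nosym : (modesD.erase "keep-symbols").values = [rmDigitsA, rmStopsA] := rfl
lemma vals_nodig : (modesD.erase "keep-digits").values = [rmSymbolsA, rmStopsA] := rfl
lemma vals_nostop : (modesD.erase "keep-stops").values = [rmSymbolsA, rmDigitsA] := rfl

-- A's full pipeline (symbols, digits, stops) equals B's recursion with no skip
lemma pipeline_plain (r : List String) :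
    rmStopsA (rmDigitsA (rmSymbolsA r)) = goB "" r := by
  rw [goB_eq_filter_map "" (by decide), rmSymbolsA_eq_map, rmDigitsA_eq_map, List.map_map]
  unfold rmStopsA
  congr 1
  apply List.map_congr_left
  intro w _
  exact (scrubB_notSymDig w "" (by decide) (by decide)).symm

-- ===== VERDICT (by name: the statement is the Claim_ definition above) =====
set_option maxHeartbeats 1600000 in
theorem process_spec : Claim_equal_process := by
  intro txt mode hdom hpre
  unfold Spec_process
  by_cases hw : PySem.Str.split₀ (PySem.Str.lower txt) = []
  · simp only [process, process_alt, hw, reduceIte]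
  · have hdict : PySem.Dict.ofList
        [("keep-symbols", rmSymbolsA), ("keep-digits", rmDigitsA), ("keep-stops", rmStopsA)] =
          modesD := rfl
    rcases hpre with h | h | h | h | h | h
    · exact absurd h hw
    · subst h
      simp only [process, process_alt, if_neg hw, Option.getD_none, hdict, vals_all]
      simp only [List.foldl_cons, List.foldl_nil]
      exact pipeline_plain _
    · subst h
      simp only [process, process_alt, if_neg hw, Option.getD_some, hdict, reduceIte, vals_all]
      simp only [List.foldl_cons, List.foldl_nil]
      exact pipeline_plain _
    · subst h
      simp only [process, process_alt, if_neg hw, Option.getD_some, hdict,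
        if_neg (show ¬ ("keep-symbols" : String) = "" by decide), vals_nosym]
      simp only [List.foldl_cons, List.foldl_nil]
      rw [goB_eq_filter_map "keep-symbols" (by decide), rmDigitsA_eq_map]
      unfold rmStopsA
      refine congrArg _ (List.map_congr_left ?_)
      intro w _
      exact (scrubB_sym w).symm
    · subst h
      simp only [process, process_alt, if_neg hw, Option.getD_some, hdict,
        if_neg (show ¬ ("keep-digits" : String) = "" by decide), vals_nodig]
      simp only [List.foldl_cons, List.foldl_nil]
      rw [goB_eq_filter_map "keep-digits" (by decide), rmSymbolsA_eq_map]
      unfold rmStopsA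
      refine congrArg _ (List.map_congr_left ?_)
      intro w _
      exact (scrubB_dig w).symm
    · subst h
      simp only [process, process_alt, if_neg hw, Option.getD_some, hdict,
        if_neg (show ¬ ("keep-stops" : String) = "" by decide), vals_nostop]
      simp only [List.foldl_cons, List.foldl_nil]
      rw [goB_stops, rmSymbolsA_eq_map, rmDigitsA_eq_map, List.map_map]
      apply List.map_congr_left
      intro w _
      exact (scrubB_notSymDig w "keep-stops" (by decide) (by decide)).symm
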